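-- pv_equiv track=rewrite | github.com/alecjackson27/OvertPrivilege | HW3/suzieHash.py | shuffle_columns
-- ===== SOURCE A (Python) =====
-- def shuffle_columns(key, orig):
--     pairs = []
--     for i in range(len(key)):
--         pairs.append((key[i], orig[i]))
--     pairs.sort(key=lambda x: x[0])
--     newOrdered = []
--     for i in range(len(pairs)):
--         newOrdered.append(pairs[i][1])
--     return newOrdered
-- ===== SOURCE B (Python) =====
-- def shuffle_columns(key, orig):
--     groups = {}
--     for k, v in zip(key, orig):
--         groups.setdefault(k, []).append(v)
--     out = []
--     for k in sorted(groups):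
--         out.extend(groups[k])
--     return out
-- ===== Notes on version B (the rewrite author's own statement) =====
-- stated objective: alternative
-- what changed: B groups the orig values into a dict keyed by their key value (preserving encounter order inside each group) and concatenates the groups over the sorted distinct keys, instead of stably sorting an explicit (key, orig) pair list and unpacking it.
import Mathlib
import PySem

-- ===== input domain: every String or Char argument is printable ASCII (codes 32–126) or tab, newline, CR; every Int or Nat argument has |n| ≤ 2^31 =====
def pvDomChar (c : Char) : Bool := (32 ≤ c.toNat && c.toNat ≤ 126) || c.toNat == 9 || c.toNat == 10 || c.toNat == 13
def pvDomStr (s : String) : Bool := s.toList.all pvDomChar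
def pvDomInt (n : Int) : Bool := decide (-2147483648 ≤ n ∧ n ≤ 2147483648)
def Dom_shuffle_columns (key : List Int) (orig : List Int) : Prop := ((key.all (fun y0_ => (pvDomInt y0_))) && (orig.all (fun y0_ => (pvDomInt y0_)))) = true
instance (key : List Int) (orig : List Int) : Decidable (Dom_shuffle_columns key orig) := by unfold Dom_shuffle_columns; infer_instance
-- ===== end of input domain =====

-- B groups the orig values in a dict keyed by key value and concatenates the groups over the sorted distinct keys, instead of stably sorting an explicit pair list (alternative algorithm; return-value equivalence).

-- ===== PORT A =====
def shuffle_columns (key : List Int) (orig : List Int) : List Int :=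
  let pairs : List (Int × Int) :=
    (PySem.List.pyRange 0 (key.length : Int) 1).foldl
      (fun acc i => acc ++ [(PySem.List.pyGetD key i 0, PySem.List.pyGetD orig i 0)]) []
  let pairs := PySem.List.sorted pairs (fun x => x.1)
  (PySem.List.pyRange 0 (pairs.length : Int) 1).foldl
    (fun acc i => acc ++ [(PySem.List.pyGetD pairs i (0, 0)).2]) []

-- ===== PORT B =====
def shuffle_columns_alt (key : List Int) (orig : List Int) : List Int :=
  let groups : PySem.Dict Int (List Int) :=
    (key.zip orig).foldl (fun d p => d.modify p.1 [] (fun g => g ++ [p.2])) PySem.Dict.empty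
  (PySem.List.sorted groups.keys (fun k => k)).foldl (fun acc k => acc ++ groups.getD k []) []

-- ===== PRECONDITION & SPEC =====
-- Pre_ excludes len(key) > len(orig), on which A raises IndexError.
def Pre_shuffle_columns (key : List Int) (orig : List Int) : Prop := key.length ≤ orig.length
instance (key : List Int) (orig : List Int) : Decidable (Pre_shuffle_columns key orig) := by unfold Pre_shuffle_columns; infer_instance
def pvWitness_shuffle_columns : List Int × List Int := ([3, 1, 2], [10, 20, 30])

def Spec_shuffle_columns (key : List Int) (orig : List Int) (out : List Int) : Prop := out = shuffle_columns_alt key orig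
instance (key : List Int) (orig : List Int) (out : List Int) : Decidable (Spec_shuffle_columns key orig out) := by unfold Spec_shuffle_columns; infer_instance

-- ===== CLAIM (what is proved, stated in full; the proofs are below) =====
def Claim_equal_shuffle_columns : Prop := ∀ (key : List Int) (orig : List Int), Dom_shuffle_columns key orig → Pre_shuffle_columns key orig → Spec_shuffle_columns key orig (shuffle_columns key orig)

-- ===== LEMMAS AND PROOFS =====

-- A's first loop builds exactly key.zip orig when len key ≤ len orig
theorem pairs_eq_zip (key orig : List Int) (h : key.length ≤ orig.length) :
    (PySem.List.pyRange 0 (key.length : Int) 1).map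
      (fun i => (PySem.List.pyGetD key i 0, PySem.List.pyGetD orig i 0)) = key.zip orig := by
  rw [PySem.List.pyRange_one]
  apply List.ext_getElem
  · simp; omega
  · intro i h1 h2
    simp only [List.getElem_map, List.getElem_range, zero_add, PySem.List.pyGetD_natCast,
      List.getElem_zip]
    have hi : i < key.length := by simp [List.length_zip] at h2; omega
    rw [List.getD_eq_getElem _ _ hi, List.getD_eq_getElem _ _ (by omega)]

-- A's second loop over a pair list is the projection of its second components
theorem unpack_loop (pairs : List (Int × Int)) :
    (PySem.List.pyRange 0 (pairs.length : Int) 1).map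
      (fun i => (PySem.List.pyGetD pairs i (0, 0)).2)
      = pairs.map (fun p => p.2) := by
  rw [show (fun i => (PySem.List.pyGetD pairs i (0, 0)).2)
        = ((fun p : Int × Int => p.2) ∘ (fun i => PySem.List.pyGetD pairs i (0, 0))) from rfl,
      ← List.map_map, PySem.List.map_pyGetD_pyRange_zero']

-- stable insertion sort processes an appended last element by inserting it into the sorted rest
theorem sorted_snoc {α κ : Type} [LT κ] [DecidableLT κ] (key : α → κ) (xs : List α) (x : α) :
    PySem.List.sorted (xs ++ [x]) key
      = PySem.List.insertBy (fun a b => decide (key a < key b)) x (PySem.List.sorted xs key) := by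
  rw [PySem.List.sorted_eq_foldl_insertBy, PySem.List.sorted_eq_foldl_insertBy, List.foldl_append]
  rfl

theorem insertBy_all_true {α : Type} (bf : α → α → Bool) (x : α) (t : List α)
    (h : ∀ y ∈ t, bf x y = true) : PySem.List.insertBy bf x t = x :: t := by
  cases t with
  | nil => rfl
  | cons y t => simp [PySem.List.insertBy, h y (by simp)]

theorem insertBy_skip {α : Type} (bf : α → α → Bool) (x : α) (s t : List α)
    (h : ∀ y ∈ s, bf x y = false) : PySem.List.insertBy bf x (s ++ t) = s ++ PySem.List.insertBy bf x t := by
  induction s with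
  | nil => rfl
  | cons y s ih =>
    simp only [List.cons_append, PySem.List.insertBy, h y (by simp)]
    simp only [Bool.false_eq_true, if_false, List.cons.injEq, true_and]
    exact ih (fun z hz => h z (by simp [hz]))

-- inserting a pair whose key already occurs appends it at the end of its group
theorem insert_into_groups_mem (p : Int × Int) (S : List Int) (g : Int → List (Int × Int))
    (hS : S.Pairwise (· < ·)) (hg : ∀ k ∈ S, ∀ q ∈ g k, q.1 = k) (hmem : p.1 ∈ S) :
    PySem.List.insertBy (fun a b => decide (a.1 < b.1)) p (S.flatMap g)
      = S.flatMap (fun k => if k == p.1 then g k ++ [p] else g k) := by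
  induction S with
  | nil => cases hmem
  | cons k S ih =>
    have hlt : ∀ y ∈ S, k < y := fun y hy => (List.pairwise_cons.mp hS).1 y hy
    have hS' := (List.pairwise_cons.mp hS).2
    simp only [List.flatMap_cons]
    by_cases hk : k = p.1
    · rw [insertBy_skip _ _ _ _ (fun y hy => by
        have h1 := hg k (by simp) y hy
        simp [h1, hk])]
      rw [insertBy_all_true _ _ _ (fun y hy => by
        obtain ⟨k', hk', hy'⟩ := List.mem_flatMap.mp hy
        have h1 := hg k' (by simp [hk']) y hy'
        have h2 := hlt k' hk'
        simp [h1]; omega)]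
      have hrest : S.flatMap (fun k' => if k' == p.1 then g k' ++ [p] else g k') = S.flatMap g := by
        apply List.flatMap_congr
        intro k' hk'
        have := hlt k' hk'
        simp [show ¬ (k' = p.1) by omega]
      simp only [hk, beq_self_eq_true, if_true]
      rw [hrest]
      simp
    · have hmem' : p.1 ∈ S := by cases hmem with
        | head => exact absurd rfl hk
        | tail _ h => exact h
      rw [insertBy_skip _ _ _ _ (fun y hy => by
        have h1 := hg k (by simp) y hy
        have h2 := hlt p.1 hmem'
        simp [h1]; omega)]
      rw [ih hS' (fun k' hk' => hg k' (by simp [hk'])) hmem']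
      simp [show ¬ (k = p.1) from hk]

-- inserting a pair with a fresh key creates a new singleton group at its sorted position
theorem insert_into_groups_new (p : Int × Int) (S : List Int) (g : Int → List (Int × Int))
    (hS : S.Pairwise (· < ·)) (hg : ∀ k ∈ S, ∀ q ∈ g k, q.1 = k) (hmem : p.1 ∉ S) :
    PySem.List.insertBy (fun a b => decide (a.1 < b.1)) p (S.flatMap g)
      = (PySem.List.insertBy (fun a b => decide (a < b)) p.1 S).flatMap
          (fun k => if k == p.1 then [p] else g k) := by
  induction S with
  | nil => simp [PySem.List.insertBy]
  | cons k S ih =>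
    have hlt : ∀ y ∈ S, k < y := fun y hy => (List.pairwise_cons.mp hS).1 y hy
    have hS' := (List.pairwise_cons.mp hS).2
    have hk : k ≠ p.1 := fun h => hmem (h ▸ List.mem_cons_self ..)
    have hmem' : p.1 ∉ S := fun h => hmem (List.mem_cons_of_mem _ h)
    rcases lt_or_gt_of_ne (Ne.symm hk) with hpk | hpk
    · -- p.1 < k : p goes in front of everything
      rw [insertBy_all_true _ _ _ (fun y hy => by
        obtain ⟨k', hk', hy'⟩ := List.mem_flatMap.mp hy
        have h1 := hg k' hk' y hy'
        rcases List.mem_cons.mp hk' with h | h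
        · simp [h1, h]; omega
        · have := hlt k' h; simp [h1]; omega)]
      rw [show PySem.List.insertBy (fun a b => decide (a < b)) p.1 (k :: S) = p.1 :: k :: S by
        simp [PySem.List.insertBy, hpk]]
      rw [show ((p.1 :: k :: S).flatMap (fun k' => if k' == p.1 then [p] else g k'))
            = [p] ++ (k :: S).flatMap (fun k' => if k' == p.1 then [p] else g k') by
        simp]
      rw [show (k :: S).flatMap (fun k' => if k' == p.1 then [p] else g k') = (k :: S).flatMap g by
        apply List.flatMap_congr
        intro k' hk'
        rcases List.mem_cons.mp hk' with h | h
        · simp [h, show ¬ (k = p.1) from hk]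
        · have := hlt k' h
          simp [show ¬ (k' = p.1) by omega]]
      rfl
    · -- k < p.1 : skip group k
      simp only [List.flatMap_cons]
      rw [insertBy_skip _ _ _ _ (fun y hy => by
        have h1 := hg k (by simp) y hy
        simp [h1]; omega)]
      rw [ih hS' (fun k' hk' => hg k' (by simp [hk'])) hmem']
      rw [show PySem.List.insertBy (fun a b => decide (a < b)) p.1 (k :: S)
            = k :: PySem.List.insertBy (fun a b => decide (a < b)) p.1 S by
        simp [PySem.List.insertBy, show ¬ (p.1 < k) by omega]]
      simp [show ¬ (k = p.1) from hk]

-- the stable sort of a pair list by first component is the concatenation, over the sorted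
-- distinct keys, of the groups of pairs with that key in their original order
theorem stable_sort_group (zs : List (Int × Int)) :
    PySem.List.sorted zs (fun p => p.1)
      = (PySem.List.sorted (PySem.Set.ofList (zs.map Prod.fst)) (fun k => k)).flatMap
          (fun k => zs.filter (fun p => p.1 == k)) := by
  induction zs using List.reverseRecOn with
  | nil => rfl
  | append_singleton zs p ih =>
    have hg : ∀ k ∈ PySem.List.sorted (PySem.Set.ofList (zs.map Prod.fst)) (fun k => k),
        ∀ q ∈ zs.filter (fun p => p.1 == k), q.1 = k := by
      intro k _ q hq
      simpa using (List.mem_filter.mp hq).2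
    have hS := PySem.List.sorted_ofList_pairwise_lt (zs.map Prod.fst)
    rw [sorted_snoc]
    rw [ih]
    have hmap : (zs ++ [p]).map Prod.fst = zs.map Prod.fst ++ [p.1] := by simp
    by_cases hmem : p.1 ∈ zs.map Prod.fst
    · have hofL : PySem.Set.ofList ((zs ++ [p]).map Prod.fst) = PySem.Set.ofList (zs.map Prod.fst) := by
        rw [hmap, PySem.Set.ofList_eq_foldl, List.foldl_append]
        simp only [List.foldl_cons, List.foldl_nil]
        rw [← PySem.Set.ofList_eq_foldl]
        simp [PySem.Set.add, PySem.Set.contains, hmem]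
      rw [hofL]
      have hmemS : p.1 ∈ PySem.List.sorted (PySem.Set.ofList (zs.map Prod.fst)) (fun k => k) := by
        rw [PySem.List.mem_sorted]
        simpa [PySem.Set.mem_ofList] using hmem
      rw [insert_into_groups_mem p _ _ hS hg hmemS]
      apply List.flatMap_congr
      intro k _
      rw [List.filter_append]
      by_cases hk : k = p.1
      · simp [hk]
      · simp [hk, show ¬ p.1 = k from fun h => hk h.symm]
    · have hofL : PySem.Set.ofList ((zs ++ [p]).map Prod.fst)
          = PySem.Set.ofList (zs.map Prod.fst) ++ [p.1] := by
        rw [hmap, PySem.Set.ofList_eq_foldl, List.foldl_append]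
        simp only [List.foldl_cons, List.foldl_nil]
        rw [← PySem.Set.ofList_eq_foldl]
        simp [PySem.Set.add, PySem.Set.contains, hmem, PySem.Set.mem_ofList]
      rw [hofL, sorted_snoc]
      have hmemS : p.1 ∉ PySem.List.sorted (PySem.Set.ofList (zs.map Prod.fst)) (fun k => k) := by
        rw [PySem.List.mem_sorted]
        simpa [PySem.Set.mem_ofList] using hmem
      rw [insert_into_groups_new p _ _ hS hg hmemS]
      apply List.flatMap_congr
      intro k hk
      rw [List.filter_append]
      rcases (PySem.List.mem_insertBy _ _ _ _).mp hk with h | h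
      · have hnil : zs.filter (fun q => q.1 == k) = [] := by
          rw [List.filter_eq_nil_iff]
          intro q hq
          have hq' : q.1 ∈ zs.map Prod.fst := List.mem_map_of_mem hq
          simp only [beq_iff_eq]
          intro hqk
          exact hmem (h ▸ hqk ▸ hq')
        rw [hnil]
        simp [h]
      · have hkne : k ≠ p.1 := by
          intro hkk
          rw [PySem.List.mem_sorted] at h
          exact hmem (by simpa [PySem.Set.mem_ofList, hkk] using h)
        simp [hkne, show ¬ p.1 = k from fun hh => hkne hh.symm]

-- ===== VERDICT (by name: the statements are the Claim_ definitions above) =====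
theorem shuffle_columns_spec : Claim_equal_shuffle_columns := by
  intro key orig _ hpre
  unfold Spec_shuffle_columns shuffle_columns shuffle_columns_alt
  simp only [PySem.List.foldl_append_singleton_eq_map, List.nil_append,
    PySem.List.foldl_append_eq_flatMap]
  rw [pairs_eq_zip key orig hpre, unpack_loop]
  rw [PySem.Dict.keys_foldl_modify_key]
  rw [PySem.Dict.keys_empty]
  rw [show PySem.Set.update ([] : PySem.Set Int) ((key.zip orig).map Prod.fst)
        = PySem.Set.ofList ((key.zip orig).map Prod.fst) from (PySem.Set.ofList_eq_foldl _).symm]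
  rw [stable_sort_group (key.zip orig), List.map_flatMap]
  apply List.flatMap_congr
  intro k _
  rw [PySem.Dict.getD_foldl_modify_append, PySem.Dict.getD_empty]
  rfl
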